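-- pv_equiv track=rewrite | github.com/DieterJoubert/advent_of_code | 2022/day_08.py | is_node_visible
-- ===== SOURCE A (Python) =====
-- direction_to_delta = {
--    'N': (-1, 0),
--    'S': (+1, 0),
--    'W': (0, -1),
--    'E': (0, +1)
-- }
--
-- def is_visible_in_direction(grid, i, j, direction):
--    this_height = grid[i][j]
--    delta = direction_to_delta[direction]
--    neighbor = (i + delta[0], j + delta[1])
--
--    while True:
--       if neighbor[0] < 0 or neighbor[0] >= len(grid):
--          break
--       if neighbor[1] < 0 or neighbor[1] >= len(grid[0]):
--          break
--
--       neighbor_height = grid[neighbor[0]][neighbor[1]]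
--       if neighbor_height >= this_height:
--          return False
--
--       neighbor = (neighbor[0] + delta[0], neighbor[1] + delta[1])
--
--    return True
--
-- def is_node_visible(grid, i, j):
--    if i == 0 or j == 0 or i == len(grid)-1 or j == len(grid[0])-1:
--       return True
--
--    for direction in direction_to_delta.keys():
--       check_direction = is_visible_in_direction(grid, i, j, direction)
--       if check_direction:
--          return True
--
--    return False
-- ===== SOURCE B (Python) =====
-- def is_node_visible(grid, i, j):
--     if i == 0 or j == 0 or i == len(grid)-1 or j == len(grid[0])-1:
--         return True
--     row = grid[i]
--     h = row[j]
--     col = [r[j] for r in grid]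
--     return (max(row[:j]) < h or max(row[j+1:]) < h
--             or max(col[:i]) < h or max(col[i+1:]) < h)
-- ===== Notes on version B (the rewrite author's own statement) =====
-- stated objective: simpler
-- what changed: Replaces the four early-exit directional neighbor walks (a while-loop per direction driven by a delta dictionary) by slicing each of the four rays (row[:j], row[j+1:], and the column's two parts) and comparing the cell against max() of each slice.
-- outside the precondition, e.g. on is_node_visible([[9, 9, 9], [9, 5, 9], [9, 9, 9]], -2, 1): A returns True, B returns False; on is_node_visible([[9, 9, 9, 9, 9], [9, 9, 5, 0, 0, 9], [9, 9, 9, 9, 9]], 1, 2): A returns True, B returns False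
import Mathlib
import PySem

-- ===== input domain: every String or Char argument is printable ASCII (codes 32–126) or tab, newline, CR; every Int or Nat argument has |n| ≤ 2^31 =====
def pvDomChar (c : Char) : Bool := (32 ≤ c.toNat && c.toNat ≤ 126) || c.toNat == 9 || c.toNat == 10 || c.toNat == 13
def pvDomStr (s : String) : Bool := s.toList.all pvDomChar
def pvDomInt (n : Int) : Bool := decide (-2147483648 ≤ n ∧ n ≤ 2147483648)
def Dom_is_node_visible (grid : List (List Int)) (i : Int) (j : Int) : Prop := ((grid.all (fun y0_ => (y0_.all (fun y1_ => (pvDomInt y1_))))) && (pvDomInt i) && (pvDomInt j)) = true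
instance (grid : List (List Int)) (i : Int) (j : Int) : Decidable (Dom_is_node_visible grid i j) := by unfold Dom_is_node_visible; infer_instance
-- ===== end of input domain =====

-- B replaces A's four early-exit directional walks by comparing the cell against the max of each
-- of the four ray slices (simpler decomposition); equivalence is about the return value only.

-- ===== PORT A =====
def direction_to_delta : PySem.Dict String (Int × Int) :=
  PySem.Dict.ofList [("N", (-1, 0)), ("S", (1, 0)), ("W", (0, -1)), ("E", (0, 1))]

-- the 'while True' walk of is_visible_in_direction; fuel only makes the same walk total
-- (under Pre_ the walk always leaves the grid before the fuel runs out)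
def visLoop (grid : List (List Int)) (thisHeight d0 d1 : Int) : Nat → Int → Int → Bool
  | 0, _, _ => true
  | fuel+1, n0, n1 =>
    if n0 < 0 ∨ (grid.length : Int) ≤ n0 then true
    else if n1 < 0 ∨ ((grid.headD []).length : Int) ≤ n1 then true
    else
      let nh := PySem.List.pyGetD (PySem.List.pyGetD grid n0 []) n1 0
      if thisHeight ≤ nh then false
      else visLoop grid thisHeight d0 d1 fuel (n0 + d0) (n1 + d1)

def is_visible_in_direction (grid : List (List Int)) (i j : Int) (dir : String) : Bool :=
  let thisHeight := PySem.List.pyGetD (PySem.List.pyGetD grid i []) j 0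
  let delta := (direction_to_delta.get? dir).getD (0, 0)
  visLoop grid thisHeight delta.1 delta.2
    (grid.length + (grid.headD []).length + i.natAbs + j.natAbs + 2)
    (i + delta.1) (j + delta.2)

def is_node_visible (grid : List (List Int)) (i : Int) (j : Int) : Bool :=
  if i == 0 || j == 0 || i == (grid.length : Int) - 1 || j == ((grid.headD []).length : Int) - 1
  then true
  else direction_to_delta.keys.any (fun dir => is_visible_in_direction grid i j dir)

-- ===== PORT B =====
-- max(xs) < h  (default only for totality; under Pre_ every ray is nonempty)
def maxLt (xs : List Int) (h : Int) : Bool :=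
  decide (((PySem.List.max? xs (fun x => x)).getD 0) < h)

def is_node_visible_alt (grid : List (List Int)) (i : Int) (j : Int) : Bool :=
  if i == 0 || j == 0 || i == (grid.length : Int) - 1 || j == ((grid.headD []).length : Int) - 1
  then true
  else
    let row := PySem.List.pyGetD grid i []
    let h := PySem.List.pyGetD row j 0
    let col := grid.map (fun r => PySem.List.pyGetD r j 0)
    maxLt (PySem.List.slice row none (some j)) h ||
    maxLt (PySem.List.slice row (some (j + 1)) none) h ||
    maxLt (PySem.List.slice col none (some i)) h ||
    maxLt (PySem.List.slice col (some (i + 1)) none) h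

-- ===== PRECONDITION & SPEC =====
-- Pre_ excludes inputs that the edge guard does not catch and whose grid is non-rectangular or
-- whose cell index is out of range or negative: there A either raises IndexError or returns
-- values that are accidents of Python's negative-index wraparound and of A's bounding every
-- row by row 0's length.
def Pre_is_node_visible (grid : List (List Int)) (i : Int) (j : Int) : Prop :=
  (i = 0 ∨ j = 0 ∨ i = (grid.length : Int) - 1
    ∨ (grid ≠ [] ∧ j = ((grid.headD []).length : Int) - 1)) ∨
  ((∀ r ∈ grid, r.length = (grid.headD []).length) ∧
   0 ≤ i ∧ i < (grid.length : Int) ∧ 0 ≤ j ∧ j < ((grid.headD []).length : Int))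

instance (grid : List (List Int)) (i : Int) (j : Int) : Decidable (Pre_is_node_visible grid i j) := by
  unfold Pre_is_node_visible; infer_instance

def pvWitness_is_node_visible : List (List Int) × Int × Int := ([[3, 1, 2], [1, 0, 1], [2, 1, 3]], 1, 1)

def Spec_is_node_visible (grid : List (List Int)) (i : Int) (j : Int) (out : Bool) : Prop := out = is_node_visible_alt grid i j
instance (grid : List (List Int)) (i : Int) (j : Int) (out : Bool) : Decidable (Spec_is_node_visible grid i j out) := by unfold Spec_is_node_visible; infer_instance

-- ===== CLAIM (what is proved, stated in full; the proofs are below) =====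
def Claim_equal_is_node_visible : Prop := ∀ (grid : List (List Int)) (i : Int) (j : Int), Dom_is_node_visible grid i j → Pre_is_node_visible grid i j → Spec_is_node_visible grid i j (is_node_visible grid i j)

-- ===== LEMMAS AND PROOFS =====

-- max(xs) < h is the same as every element of xs being < h (xs nonempty)
lemma maxLt_eq_all (xs : List Int) (h : Int) (hne : xs ≠ []) :
    maxLt xs h = xs.all (fun x => decide (x < h)) := by
  obtain ⟨x, t, rfl⟩ := List.exists_cons_of_ne_nil hne
  unfold maxLt
  rw [PySem.List.max?_id_cons]
  simp only [Option.getD_some]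
  have hle := PySem.List.le_foldl_max t x
  have hmem := PySem.List.foldl_max_mem t x
  by_cases hc : t.foldl max x < h
  · have hall : ∀ y ∈ x :: t, y < h := by
      intro y hy
      rcases List.mem_cons.mp hy with rfl | hy
      · exact lt_of_le_of_lt hle.1 hc
      · exact lt_of_le_of_lt (hle.2 y hy) hc
    simp only [hc, decide_true]
    symm
    rw [List.all_eq_true]
    intro y hy
    exact decide_eq_true (hall y hy)
  · have hMmem : t.foldl max x ∈ x :: t := by
      rcases hmem with h1 | h2
      · rw [h1]; exact List.mem_cons_self
      · exact List.mem_cons_of_mem _ h2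
    simp only [hc, decide_false]
    symm
    rw [List.all_eq_false]
    exact ⟨_, hMmem, by simpa using hc⟩

-- walk East (delta (0,1)) over the row = all of row.drop
lemma visLoop_E (grid : List (List Int)) (h i : Int)
    (hrect : ∀ r ∈ grid, r.length = (grid.headD []).length)
    (hi0 : 0 ≤ i) (hin : i < (grid.length : Int)) :
    ∀ (fuel : Nat) (c : Int), 0 ≤ c →
      (PySem.List.pyGetD grid i []).length - c.toNat ≤ fuel →
      visLoop grid h 0 1 fuel i c
        = ((PySem.List.pyGetD grid i []).drop c.toNat).all (fun x => decide (x < h)) := by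
  have hrow : PySem.List.pyGetD grid i [] = grid[i.toNat]'(by omega) :=
    PySem.List.pyGetD_eq_getElem _ _ hi0 hin
  have hm : (PySem.List.pyGetD grid i []).length = (grid.headD []).length := by
    rw [hrow]; exact hrect _ (by simp)
  intro fuel
  induction fuel with
  | zero =>
    intro c hc hf
    rw [List.drop_eq_nil_of_le (by omega)]
    simp [visLoop]
  | succ k ih =>
    intro c hc hf
    rw [visLoop]
    rw [if_neg (by omega)]
    by_cases hcm : ((grid.headD []).length : Int) ≤ c
    · rw [if_pos (by omega), List.drop_eq_nil_of_le (by omega)]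
      simp
    · rw [if_neg (by omega)]
      have hclt : c.toNat < (PySem.List.pyGetD grid i []).length := by omega
      have hacc : PySem.List.pyGetD (PySem.List.pyGetD grid i []) c 0
          = (PySem.List.pyGetD grid i [])[c.toNat] :=
        PySem.List.pyGetD_eq_getElem _ _ hc (by omega)
      rw [List.drop_eq_getElem_cons hclt, List.all_cons]
      simp only [hacc]
      by_cases hge : h ≤ (PySem.List.pyGetD grid i [])[c.toNat]
      · rw [if_pos hge,
            decide_eq_false (show ¬ (PySem.List.pyGetD grid i [])[c.toNat] < h by omega),
            Bool.false_and]
      · rw [if_neg hge]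
        have := ih (c + 1) (by omega) (by omega)
        simp only [add_zero] at this ⊢
        rw [this, show (c + 1).toNat = c.toNat + 1 by omega,
            decide_eq_true (show (PySem.List.pyGetD grid i [])[c.toNat] < h by omega),
            Bool.true_and]

-- walk West (delta (0,-1)) over the row = all of row.take
lemma visLoop_W (grid : List (List Int)) (h i : Int)
    (hrect : ∀ r ∈ grid, r.length = (grid.headD []).length)
    (hi0 : 0 ≤ i) (hin : i < (grid.length : Int)) :
    ∀ (fuel : Nat) (c : Int), c < ((PySem.List.pyGetD grid i []).length : Int) →
      (c + 1).toNat ≤ fuel →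
      visLoop grid h 0 (-1) fuel i c
        = ((PySem.List.pyGetD grid i []).take (c + 1).toNat).all (fun x => decide (x < h)) := by
  have hrow : PySem.List.pyGetD grid i [] = grid[i.toNat]'(by omega) :=
    PySem.List.pyGetD_eq_getElem _ _ hi0 hin
  have hm : (PySem.List.pyGetD grid i []).length = (grid.headD []).length := by
    rw [hrow]; exact hrect _ (by simp)
  intro fuel
  induction fuel with
  | zero =>
    intro c hc hf
    rw [show (c + 1).toNat = 0 by omega]
    simp [visLoop]
  | succ k ih =>
    intro c hc hf
    rw [visLoop]
    rw [if_neg (by omega)]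
    by_cases hcneg : c < 0
    · rw [if_pos (by omega), show (c + 1).toNat = 0 by omega]
      simp
    · rw [if_neg (by omega)]
      have hclt : c.toNat < (PySem.List.pyGetD grid i []).length := by omega
      have hacc : PySem.List.pyGetD (PySem.List.pyGetD grid i []) c 0
          = (PySem.List.pyGetD grid i [])[c.toNat] :=
        PySem.List.pyGetD_eq_getElem _ _ (by omega) (by omega)
      have htake : ((PySem.List.pyGetD grid i []).take ((c + 1).toNat)).all (fun x => decide (x < h))
          = (((PySem.List.pyGetD grid i []).take c.toNat).all (fun x => decide (x < h))
            && decide ((PySem.List.pyGetD grid i [])[c.toNat] < h)) := by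
        rw [show (c + 1).toNat = c.toNat + 1 by omega, List.take_add_one, List.all_append,
            List.getElem?_eq_getElem hclt]
        simp only [Option.toList_some, List.all_cons, List.all_nil, Bool.and_true]
      simp only [hacc]
      by_cases hge : h ≤ (PySem.List.pyGetD grid i [])[c.toNat]
      · rw [if_pos hge, htake,
            decide_eq_false (show ¬ (PySem.List.pyGetD grid i [])[c.toNat] < h by omega),
            Bool.and_false]
      · rw [if_neg hge]
        have := ih (c - 1) (by omega) (by omega)
        simp only [add_zero] at this ⊢
        rw [show c + -1 = c - 1 by ring, this, show (c - 1 + 1).toNat = c.toNat by omega, htake,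
            decide_eq_true (show (PySem.List.pyGetD grid i [])[c.toNat] < h by omega),
            Bool.and_true]

-- walk South (delta (1,0)) over the column = all of col.drop
lemma visLoop_S (grid : List (List Int)) (h j : Int)
    (hj0 : 0 ≤ j) (hjm : j < ((grid.headD []).length : Int)) :
    ∀ (fuel : Nat) (c : Int), 0 ≤ c →
      grid.length - c.toNat ≤ fuel →
      visLoop grid h 1 0 fuel c j
        = ((grid.map (fun r => PySem.List.pyGetD r j 0)).drop c.toNat).all (fun x => decide (x < h)) := by
  intro fuel
  induction fuel with
  | zero =>
    intro c hc hf
    rw [List.drop_eq_nil_of_le (by simp; omega)]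
    simp [visLoop]
  | succ k ih =>
    intro c hc hf
    rw [visLoop]
    by_cases hcn : (grid.length : Int) ≤ c
    · rw [if_pos (by omega), List.drop_eq_nil_of_le (by simp; omega)]
      simp
    · rw [if_neg (by omega), if_neg (by omega)]
      have hclt : c.toNat < (grid.map (fun r => PySem.List.pyGetD r j 0)).length := by simp; omega
      have hrowc : PySem.List.pyGetD grid c [] = grid[c.toNat]'(by omega) :=
        PySem.List.pyGetD_eq_getElem _ _ hc (by omega)
      have hacc : PySem.List.pyGetD (PySem.List.pyGetD grid c []) j 0
          = (grid.map (fun r => PySem.List.pyGetD r j 0))[c.toNat]'hclt := by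
        rw [hrowc, List.getElem_map]
      rw [List.drop_eq_getElem_cons hclt, List.all_cons]
      simp only [hacc]
      by_cases hge : h ≤ (grid.map (fun r => PySem.List.pyGetD r j 0))[c.toNat]'hclt
      · rw [if_pos hge,
            decide_eq_false (show ¬ (grid.map (fun r => PySem.List.pyGetD r j 0))[c.toNat]'hclt < h by omega),
            Bool.false_and]
      · rw [if_neg hge]
        have := ih (c + 1) (by omega) (by omega)
        simp only [add_zero] at this ⊢
        rw [this, show (c + 1).toNat = c.toNat + 1 by omega,
            decide_eq_true (show (grid.map (fun r => PySem.List.pyGetD r j 0))[c.toNat]'hclt < h by omega),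
            Bool.true_and]

-- walk North (delta (-1,0)) over the column = all of col.take
lemma visLoop_N (grid : List (List Int)) (h j : Int)
    (hj0 : 0 ≤ j) (hjm : j < ((grid.headD []).length : Int)) :
    ∀ (fuel : Nat) (c : Int), c < (grid.length : Int) →
      (c + 1).toNat ≤ fuel →
      visLoop grid h (-1) 0 fuel c j
        = ((grid.map (fun r => PySem.List.pyGetD r j 0)).take (c + 1).toNat).all (fun x => decide (x < h)) := by
  intro fuel
  induction fuel with
  | zero =>
    intro c hc hf
    rw [show (c + 1).toNat = 0 by omega]
    simp [visLoop]
  | succ k ih =>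
    intro c hc hf
    rw [visLoop]
    by_cases hcneg : c < 0
    · rw [if_pos (by omega), show (c + 1).toNat = 0 by omega]
      simp
    · rw [if_neg (by omega), if_neg (by omega)]
      have hclt : c.toNat < (grid.map (fun r => PySem.List.pyGetD r j 0)).length := by simp; omega
      have hrowc : PySem.List.pyGetD grid c [] = grid[c.toNat]'(by omega) :=
        PySem.List.pyGetD_eq_getElem _ _ (by omega) (by omega)
      have hacc : PySem.List.pyGetD (PySem.List.pyGetD grid c []) j 0
          = (grid.map (fun r => PySem.List.pyGetD r j 0))[c.toNat]'hclt := by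
        rw [hrowc, List.getElem_map]
      have htake : ((grid.map (fun r => PySem.List.pyGetD r j 0)).take ((c + 1).toNat)).all (fun x => decide (x < h))
          = (((grid.map (fun r => PySem.List.pyGetD r j 0)).take c.toNat).all (fun x => decide (x < h))
            && decide ((grid.map (fun r => PySem.List.pyGetD r j 0))[c.toNat]'hclt < h)) := by
        rw [show (c + 1).toNat = c.toNat + 1 by omega, List.take_add_one, List.all_append,
            List.getElem?_eq_getElem hclt]
        simp only [Option.toList_some, List.all_cons, List.all_nil, Bool.and_true]
      simp only [hacc]
      by_cases hge : h ≤ (grid.map (fun r => PySem.List.pyGetD r j 0))[c.toNat]'hclt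
      · rw [if_pos hge, htake,
            decide_eq_false (show ¬ (grid.map (fun r => PySem.List.pyGetD r j 0))[c.toNat]'hclt < h by omega),
            Bool.and_false]
      · rw [if_neg hge]
        have := ih (c - 1) (by omega) (by omega)
        simp only [add_zero] at this ⊢
        rw [show c + -1 = c - 1 by ring, this, show (c - 1 + 1).toNat = c.toNat by omega, htake,
            decide_eq_true (show (grid.map (fun r => PySem.List.pyGetD r j 0))[c.toNat]'hclt < h by omega),
            Bool.and_true]

-- ===== VERDICT (by name: the statement is the Claim_ definition above) =====
theorem is_node_visible_spec : Claim_equal_is_node_visible := by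
  intro grid i j _hdom hpre
  unfold Spec_is_node_visible is_node_visible is_node_visible_alt
  rcases hpre with hguard | ⟨hrect, hi0, hin, hj0, hjm⟩
  · have hg : (i == 0 || j == 0 || i == (grid.length : Int) - 1
        || j == ((grid.headD []).length : Int) - 1) = true := by
      simp only [Bool.or_eq_true, beq_iff_eq]
      tauto
    rw [if_pos hg, if_pos hg]
  by_cases hg : (i == 0 || j == 0 || i == (grid.length : Int) - 1
      || j == ((grid.headD []).length : Int) - 1) = true
  · rw [if_pos hg, if_pos hg]
  · rw [if_neg hg, if_neg hg]
    have hb : i ≠ 0 ∧ j ≠ 0 ∧ i ≠ (grid.length : Int) - 1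
        ∧ j ≠ ((grid.headD []).length : Int) - 1 := by
      simp only [Bool.or_eq_true, beq_iff_eq, not_or] at hg
      tauto
    obtain ⟨hi0', hj0', hin', hjm'⟩ := hb
    have hn3 : 1 ≤ i ∧ i ≤ (grid.length : Int) - 2 := by omega
    have hm3 : 1 ≤ j ∧ j ≤ ((grid.headD []).length : Int) - 2 := by omega
    have hrowlen : (PySem.List.pyGetD grid i []).length = (grid.headD []).length := by
      rw [PySem.List.pyGetD_eq_getElem _ _ hi0 hin]
      exact hrect _ (by simp)
    have hcollen : (grid.map (fun r => PySem.List.pyGetD r j 0)).length = grid.length := by simp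
    -- A side: the four directions
    have hkeys : direction_to_delta.keys = ["N", "S", "W", "E"] := by decide
    rw [hkeys]
    simp only [List.any_cons, List.any_nil, Bool.or_false]
    have hdN : (direction_to_delta.get? "N").getD (0, 0) = (-1, 0) := by decide
    have hdS : (direction_to_delta.get? "S").getD (0, 0) = (1, 0) := by decide
    have hdW : (direction_to_delta.get? "W").getD (0, 0) = (0, -1) := by decide
    have hdE : (direction_to_delta.get? "E").getD (0, 0) = (0, 1) := by decide
    unfold is_visible_in_direction
    rw [hdN, hdS, hdW, hdE]
    simp only [add_zero]
    set h := PySem.List.pyGetD (PySem.List.pyGetD grid i []) j 0 with hh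
    set F := grid.length + (grid.headD []).length + i.natAbs + j.natAbs + 2 with hF
    -- rewrite each walk
    rw [visLoop_N grid h j hj0 hjm F (i + -1) (by omega) (by omega)]
    rw [visLoop_S grid h j hj0 hjm F (i + 1) (by omega) (by omega)]
    rw [visLoop_W grid h i hrect hi0 hin F (j + -1) (by omega) (by omega)]
    rw [visLoop_E grid h i hrect hi0 hin F (j + 1) (by omega) (by omega)]
    -- B side: the four slices
    rw [PySem.List.slice_to _ hj0, PySem.List.slice_from _ (by omega),
        PySem.List.slice_to _ hi0, PySem.List.slice_from _ (by omega)]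
    rw [maxLt_eq_all _ _ (by
      apply List.ne_nil_of_length_pos; rw [List.length_take]; omega)]
    rw [maxLt_eq_all _ _ (by
      apply List.ne_nil_of_length_pos; rw [List.length_drop]; omega)]
    rw [maxLt_eq_all _ _ (by
      apply List.ne_nil_of_length_pos; rw [List.length_take]; omega)]
    rw [maxLt_eq_all _ _ (by
      apply List.ne_nil_of_length_pos; rw [List.length_drop]; omega)]
    rw [show (i + -1 + 1).toNat = i.toNat by omega, show (j + -1 + 1).toNat = j.toNat by omega]
    rw [show (i + 1).toNat = (i + 1).toNat from rfl]
    -- now both sides are ors of the same four 'all' terms, in different order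
    generalize ((grid.map (fun r => PySem.List.pyGetD r j 0)).take i.toNat).all (fun x => decide (x < h)) = bN
    generalize ((grid.map (fun r => PySem.List.pyGetD r j 0)).drop (i + 1).toNat).all (fun x => decide (x < h)) = bS
    generalize ((PySem.List.pyGetD grid i []).take j.toNat).all (fun x => decide (x < h)) = bW
    generalize ((PySem.List.pyGetD grid i []).drop (j + 1).toNat).all (fun x => decide (x < h)) = bE
    cases bN <;> cases bS <;> cases bW <;> cases bE <;> rfl
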